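-- pv_equiv track=rewrite | github.com/engoulet/PersonalProjects | Battleship/Board.py | proper_coords
-- ===== SOURCE A (Python) =====
-- def is_integer(n):
-- 	try:
-- 		float(n)
-- 	except ValueError:
-- 		return False
-- 	else:
-- 		return float(n).is_integer()
--
-- def proper_coords(input):
-- 	inp = input
--
-- 	if inp == "": #no input
-- 		return False
--
-- 	format_count = 0 #counts the number of vital input components, such as the comma.
-- 	#loop to find at least one int before first comma
-- 	for ch in inp:
-- 		if is_integer(ch) and format_count < 1:
-- 			format_count = 1
-- 		elif ch == "," and format_count < 1:
-- 			return False
-- 		elif ch == ",":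
-- 			break
-- 		elif not is_integer(ch):
-- 			return False
--
-- 	#check that there's one comma between two integers
-- 	for ch in inp:
-- 		if ch == "," and format_count == 1:
-- 			format_count = 2
-- 		elif not is_integer(ch):
-- 			return False
--
-- 	if format_count < 2: #didn't meet requirements
-- 		return False
--
-- 	#make sure theres at least one int after the comma
-- 	inp = inp.split(",")
-- 	if len(inp) < 2:
-- 		return False
-- 	elif not is_integer(inp[1]):
-- 		return False
--
-- 	return True
-- ===== SOURCE B (Python) =====
-- def is_integer(n):
-- 	try:
-- 		float(n)
-- 	except ValueError:
-- 		return False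
-- 	else:
-- 		return float(n).is_integer()
--
-- def proper_coords(input):
-- 	parts = input.split(",")
-- 	if len(parts) != 2:
-- 		return False
-- 	left, right = parts
-- 	if not left or not right:
-- 		return False
-- 	return all(is_integer(ch) for ch in left) and all(is_integer(ch) for ch in right)
-- ===== Notes on version B (the rewrite author's own statement) =====
-- stated objective: simpler
-- what changed: B splits the input on the comma separator first and validates the two segments (non-empty, every char an integer) instead of A's two whole-string scans driven by a format_count state machine plus a final split.
-- intended difference: On well-formed coordinate inputs consisting of one or more digits, a comma, then one or more digits whose right part has value at least 2^1024 - 2^970 (309+ digits), A returns False because is_integer feeds the whole right segment to float(), which overflows to inf; B validates the digits per character and returns True, the intended verdict for a valid coordinate. — e.g. on proper_coords("1,99999999999999999999999999999999999999999999999999999999999999999999999999999999999999999999999999999999999999999999…): A returns false, B returns true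
import Mathlib
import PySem

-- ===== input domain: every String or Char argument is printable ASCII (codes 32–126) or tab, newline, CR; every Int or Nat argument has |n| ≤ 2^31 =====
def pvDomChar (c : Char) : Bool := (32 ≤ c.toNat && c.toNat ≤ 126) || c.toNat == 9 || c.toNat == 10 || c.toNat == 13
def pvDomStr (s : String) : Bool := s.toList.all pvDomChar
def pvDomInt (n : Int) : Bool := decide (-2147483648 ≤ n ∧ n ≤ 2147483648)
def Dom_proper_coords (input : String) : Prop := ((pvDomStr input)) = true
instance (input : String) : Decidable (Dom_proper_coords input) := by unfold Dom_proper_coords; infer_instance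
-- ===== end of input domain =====

-- ===== PORT A =====
-- B re-validates the coordinate by splitting on the comma first instead of A's two whole-string
-- scans with a format counter (objective: simpler); return values only, no mutation.

-- is_integer(ch) on a single printable-ASCII char: float(ch) parses exactly '0'..'9'
def pvIsIntChar (c : Char) : Bool := c.isDigit

-- value of an all-digit string (used to model float overflow below)
def pvDigitsVal (cs : List Char) : Nat := cs.foldl (fun a c => 10 * a + (c.toNat - 48)) 0

-- is_integer(s) on the strings A's final check reaches (pieces of split(","), hence empty or
-- all-digit): float("") raises ValueError -> False; float(digits) is an integral double unless
-- the value reaches 2^1024 - 2^970, where CPython rounds to inf and inf.is_integer() is False.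
def pvIsIntStr (cs : List Char) : Bool :=
  !cs.isEmpty && cs.all pvIsIntChar && decide (pvDigitsVal cs < 2 ^ 1024 - 2 ^ 970)

-- A's first for-loop ("at least one int before first comma"); .inl b = early `return b`
def pvLoop1 : List Char → Nat → Sum Bool Nat
  | [], fc => .inr fc
  | c :: rest, fc =>
    if pvIsIntChar c && decide (fc < 1) then pvLoop1 rest 1
    else if c == ',' && decide (fc < 1) then .inl false
    else if c == ',' then .inr fc                 -- break
    else if !pvIsIntChar c then .inl false
    else pvLoop1 rest fc

-- A's second for-loop ("one comma between two integers")
def pvLoop2 : List Char → Nat → Sum Bool Nat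
  | [], fc => .inr fc
  | c :: rest, fc =>
    if c == ',' && fc == 1 then pvLoop2 rest 2
    else if !pvIsIntChar c then .inl false
    else pvLoop2 rest fc

def proper_coords (input : String) : Bool :=
  if input == "" then false
  else
    match pvLoop1 input.toList 0 with
    | .inl b => b
    | .inr fc =>
      match pvLoop2 input.toList fc with
      | .inl b => b
      | .inr fc2 =>
        if fc2 < 2 then false
        else
          let parts := PySem.Chars.splitOn input.toList [','];
          if parts.length < 2 then false
          else if !pvIsIntStr (parts.getD 1 []) then false   -- inp[1]; in range: length ≥ 2 here
          else true

-- ===== PORT B =====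
def proper_coords_alt (input : String) : Bool :=
  match PySem.Chars.splitOn input.toList [','] with   -- len(parts) != 2 -> False, else bind left, right
  | [left, right] =>
    if left.isEmpty || right.isEmpty then false
    else left.all pvIsIntChar && right.all pvIsIntChar
  | _ => false

-- ===== PRECONDITION & SPEC =====
-- On well-formed coordinates (one or more digits, a comma, one or more digits) whose right part has value ≥ 2^1024 - 2^970, A returns
-- False (its is_integer feeds the right part to float(), which overflows to inf), while B
-- validates the digits directly and returns True, the intended verdict for a valid coordinate.
def D_proper_coords (input : String) : Prop :=
  let cs := input.toList
  let l := cs.takeWhile (fun c => !(c == ','))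
  let r := cs.drop (l.length + 1)
  ',' ∈ cs ∧ l ≠ [] ∧ r ≠ [] ∧ l.all (fun c => c.isDigit) = true ∧ r.all (fun c => c.isDigit) = true ∧
    2 ^ 1024 - 2 ^ 970 ≤ r.foldl (fun a c => 10 * a + (c.toNat - 48)) 0
instance (input : String) : Decidable (D_proper_coords input) := by
  unfold D_proper_coords; infer_instance

def Spec_proper_coords (input : String) (out : Bool) : Prop :=
  ¬ D_proper_coords input → out = proper_coords_alt input
instance (input : String) (out : Bool) : Decidable (Spec_proper_coords input out) := by
  unfold Spec_proper_coords; infer_instance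

def pvDiffWitness_proper_coords : String := "1,999999999999999999999999999999999999999999999999999999999999999999999999999999999999999999999999999999999999999999999999999999999999999999999999999999999999999999999999999999999999999999999999999999999999999999999999999999999999999999999999999999999999999999999999999999999999999999999999999999999999999999999"
def pvDiffWitnessOut_proper_coords : Bool × Bool := (false, true)

-- ===== CLAIM (what is proved, stated in full; the proofs are below) =====
def Claim_unchanged_proper_coords : Prop := ∀ (input : String), Dom_proper_coords input → Spec_proper_coords input (proper_coords input)
def Claim_changed_proper_coords : Prop := Dom_proper_coords (pvDiffWitness_proper_coords) ∧ D_proper_coords (pvDiffWitness_proper_coords) ∧ proper_coords (pvDiffWitness_proper_coords) = pvDiffWitnessOut_proper_coords.1 ∧ proper_coords_alt (pvDiffWitness_proper_coords) = pvDiffWitnessOut_proper_coords.2 ∧ pvDiffWitnessOut_proper_coords.1 ≠ pvDiffWitnessOut_proper_coords.2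
def Claim_exact_proper_coords : Prop := ∀ (input : String), Dom_proper_coords input → D_proper_coords input → proper_coords input ≠ proper_coords_alt input

-- ===== LEMMAS AND PROOFS =====

-- splitOn on a single-comma separator, via a fuel-free reference function
def pvSplitC : List Char → List (List Char)
  | [] => [[]]
  | c :: t => if c = ',' then [] :: pvSplitC t else (pvSplitC t).modifyHead (c :: ·)

theorem pvSplitC_ne_nil (cs : List Char) : pvSplitC cs ≠ [] := by
  induction cs with
  | nil => simp [pvSplitC]
  | cons c t ih =>
    by_cases hc : c = ','
    · simp [pvSplitC, hc]
    · cases h : pvSplitC t with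
      | nil => exact absurd h ih
      | cons y ys => simp [pvSplitC, hc, h]

theorem pvSplitC_go_spec (fuel : Nat) (l cur : List Char) (accs : List (List Char))
    (h : l.length < fuel) :
    PySem.Chars.splitOn.go [','] fuel l cur accs =
      accs.reverse ++ (pvSplitC l).modifyHead (cur.reverse ++ ·) := by
  induction fuel generalizing l cur accs with
  | zero => omega
  | succ fuel ih =>
    cases l with
    | nil => simp [PySem.Chars.splitOn.go, pvSplitC]
    | cons c rest =>
      by_cases hc : c = ','
      · subst hc
        have hp : [','].isPrefixOf (',' :: rest) = true := by simp [List.isPrefixOf]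
        rw [PySem.Chars.splitOn.go, if_pos hp]
        simp only [List.length_cons, List.length_nil, List.drop_succ_cons, List.drop_zero]
        simp only [List.length_cons] at h
        rw [ih rest [] (cur.reverse :: accs) (by omega)]
        cases hs : pvSplitC rest with
        | nil => exact absurd hs (pvSplitC_ne_nil rest)
        | cons y ys => simp [pvSplitC, hs]
      · have hp : [','].isPrefixOf (c :: rest) = false := by
          simp [List.isPrefixOf]
          exact fun h' => hc h'.symm
        rw [PySem.Chars.splitOn.go, if_neg (by simp [hp])]
        simp only [List.length_cons] at h
        rw [ih rest (c :: cur) accs (by omega)]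
        cases hs : pvSplitC rest with
        | nil => exact absurd hs (pvSplitC_ne_nil rest)
        | cons y ys => simp [pvSplitC, hc, hs]

theorem splitOn_comma (cs : List Char) : PySem.Chars.splitOn cs [','] = pvSplitC cs := by
  unfold PySem.Chars.splitOn
  rw [pvSplitC_go_spec (cs.length + 1) cs [] [] (by omega)]
  cases hs : pvSplitC cs with
  | nil => exact absurd hs (pvSplitC_ne_nil cs)
  | cons y ys => simp

theorem pvSplitC_no_comma (cs : List Char) (h : ',' ∉ cs) : pvSplitC cs = [cs] := by
  induction cs with
  | nil => rfl
  | cons c t ih =>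
    have hc : ¬ c = ',' := fun hc => h (hc ▸ List.mem_cons_self ..)
    rw [pvSplitC, if_neg hc, ih (fun hm => h (List.mem_cons_of_mem _ hm))]
    rfl

theorem pvSplitC_comma (l r : List Char) (h : ',' ∉ l) :
    pvSplitC (l ++ ',' :: r) = l :: pvSplitC r := by
  induction l with
  | nil => simp [pvSplitC]
  | cons c t ih =>
    have hc : ¬ c = ',' := fun hc => h (hc ▸ List.mem_cons_self ..)
    rw [List.cons_append, pvSplitC, if_neg hc,
        ih (fun hm => h (List.mem_cons_of_mem _ hm))]
    rfl

theorem pvSplitC_singleton (r x : List Char) (h : pvSplitC r = [x]) : r = x ∧ ',' ∉ r := by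
  induction r generalizing x with
  | nil => simp [pvSplitC] at h; simp [h]
  | cons c t ih =>
    by_cases hc : c = ','
    · rw [pvSplitC, if_pos hc] at h
      obtain ⟨h1, h2⟩ := List.cons.injEq .. ▸ h
      exact absurd h2 (pvSplitC_ne_nil t)
    · rw [pvSplitC, if_neg hc] at h
      cases hs : pvSplitC t with
      | nil => exact absurd hs (pvSplitC_ne_nil t)
      | cons y ys =>
        rw [hs] at h
        simp only [List.modifyHead] at h
        obtain ⟨h1, h2⟩ := List.cons.injEq .. ▸ h
        obtain ⟨ht, hnt⟩ := ih y (by rw [hs, h2])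
        subst ht h1
        simp [hnt]
        exact fun h' => hc h'.symm

-- loop lemmas
theorem pvLoop1_skip (t ys : List Char) (h : t.all pvIsIntChar) :
    pvLoop1 (t ++ ys) 1 = pvLoop1 ys 1 := by
  induction t with
  | nil => rfl
  | cons c t' ih =>
    simp only [List.all_cons, Bool.and_eq_true] at h
    obtain ⟨hc, ht⟩ := h
    have hcc : (c == ',') = false := by
      by_cases hq : c = ','
      · subst hq; simp [pvIsIntChar] at hc
      · simp [hq]
    simp only [List.cons_append, pvLoop1, hc, hcc]
    simpa using ih ht

theorem pvLoop1_bad (t : List Char) (h1 : ',' ∉ t) (h2 : t.all pvIsIntChar = false) :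
    ∀ fc ys, pvLoop1 (t ++ ys) fc = .inl false := by
  induction t with
  | nil => simp at h2
  | cons c t' ih =>
    intro fc ys
    have hcne : ¬ c = ',' := fun hq => h1 (hq ▸ List.mem_cons_self ..)
    have hcc : (c == ',') = false := by simp [hcne]
    have h1' : ',' ∉ t' := fun hm => h1 (List.mem_cons_of_mem _ hm)
    cases hc : pvIsIntChar c with
    | false => simp [pvLoop1, hc, hcc]
    | true =>
      have h2' : t'.all pvIsIntChar = false := by
        simp only [List.all_cons, hc, Bool.true_and] at h2; exact h2
      by_cases hfc : fc < 1
      · simp only [List.cons_append, pvLoop1, hc, hcc, decide_eq_true hfc]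
        simpa using ih h1' h2' 1 ys
      · simp only [List.cons_append, pvLoop1, hc, hcc, decide_eq_false hfc]
        simpa using ih h1' h2' fc ys

theorem pvLoop2_skip (t ys : List Char) (fc : Nat) (h : t.all pvIsIntChar) :
    pvLoop2 (t ++ ys) fc = pvLoop2 ys fc := by
  induction t with
  | nil => rfl
  | cons c t' ih =>
    simp only [List.all_cons, Bool.and_eq_true] at h
    obtain ⟨hc, ht⟩ := h
    have hcc : (c == ',') = false := by
      by_cases hq : c = ','
      · subst hq; simp [pvIsIntChar] at hc
      · simp [hq]
    simp only [List.cons_append, pvLoop2, hc, hcc]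
    simpa using ih ht

theorem pvLoop2_two (r : List Char) :
    pvLoop2 r 2 = if r.all pvIsIntChar then .inr 2 else .inl false := by
  induction r with
  | nil => rfl
  | cons c t ih =>
    cases hc : pvIsIntChar c with
    | false =>
      simp [pvLoop2, hc]
    | true =>
      simp [pvLoop2, hc, ih]

-- first-comma decomposition facts
theorem takeWhile_decomp (l r : List Char) (h : ',' ∉ l) :
    (l ++ ',' :: r).takeWhile (fun c => !(c == ',')) = l := by
  induction l with
  | nil => simp
  | cons c t ih =>
    have hcne : ¬ c = ',' := fun hq => h (hq ▸ List.mem_cons_self ..)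
    have hcc : (c == ',') = false := by simp [hcne]
    simp only [List.cons_append, List.takeWhile_cons, hcc, Bool.not_false, if_pos]
    rw [ih (fun hm => h (List.mem_cons_of_mem _ hm))]

theorem drop_decomp (l r : List Char) :
    (l ++ ',' :: r).drop (l.length + 1) = r := by
  have h : l ++ ',' :: r = (l ++ [',']) ++ r := by simp
  have hlen : (l ++ [',']).length = l.length + 1 := by simp
  rw [h, ← hlen, List.drop_left]

theorem all_digit_eq (t : List Char) : t.all (fun c => c.isDigit) = t.all pvIsIntChar := rfl

theorem D_iff (input : String) (l r : List Char)
    (hdec : input.toList = l ++ ',' :: r) (hl : ',' ∉ l) :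
    D_proper_coords input ↔
      (l ≠ [] ∧ r ≠ [] ∧ l.all (fun c => c.isDigit) = true ∧ r.all (fun c => c.isDigit) = true ∧
        2 ^ 1024 - 2 ^ 970 ≤ r.foldl (fun a c => 10 * a + (c.toNat - 48)) 0) := by
  simp only [D_proper_coords, hdec]
  rw [takeWhile_decomp l r hl, drop_decomp l r]
  simp [List.mem_append]

theorem main_lemma (input : String) :
    (D_proper_coords input → proper_coords input = false ∧ proper_coords_alt input = true) ∧
    (¬ D_proper_coords input → proper_coords input = proper_coords_alt input) := by
  by_cases hemp : input = ""
  · subst hemp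
    exact ⟨fun hd => absurd hd (by decide), fun _ => by decide⟩
  · have hbeq : (input == "") = false := by simp [hemp]
    by_cases hcm : ',' ∈ input.toList
    · obtain ⟨l, r, hdec, hl⟩ := List.eq_append_cons_of_mem hcm
      have hsp0 : PySem.Chars.splitOn input.toList [','] = l :: pvSplitC r := by
        rw [splitOn_comma, hdec]; exact pvSplitC_comma l r hl
      have hDiff := D_iff input l r hdec hl
      cases hl0 : l with
      | nil =>
        subst hl0
        have h1 : pvLoop1 input.toList 0 = .inl false := by
          rw [hdec]
          simp [pvLoop1, pvIsIntChar]
        have hA : proper_coords input = false := by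
          simp [proper_coords, hbeq, h1]
        have hB : proper_coords_alt input = false := by
          unfold proper_coords_alt
          rw [hsp0]
          cases hs : pvSplitC r with
          | nil => exact absurd hs (pvSplitC_ne_nil r)
          | cons y ys =>
            cases ys with
            | nil => simp
            | cons z zs => rfl
        have hND : ¬ D_proper_coords input := fun hd => (hDiff.mp hd).1 rfl
        exact ⟨fun hd => absurd hd hND, fun _ => hA.trans hB.symm⟩
      | cons c t =>
        subst hl0
        cases hld : (c :: t).all pvIsIntChar with
        | false =>
          have h1 : pvLoop1 input.toList 0 = .inl false := by
            rw [hdec]; exact pvLoop1_bad (c :: t) hl hld 0 (',' :: r)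
          have hA : proper_coords input = false := by
            simp [proper_coords, hbeq, h1]
          have hB : proper_coords_alt input = false := by
            unfold proper_coords_alt
            rw [hsp0]
            cases hs : pvSplitC r with
            | nil => exact absurd hs (pvSplitC_ne_nil r)
            | cons y ys =>
              cases ys with
              | nil => simp [hld]
              | cons z zs => rfl
          have hND : ¬ D_proper_coords input := fun hd => by
            have := (hDiff.mp hd).2.2.1
            rw [all_digit_eq, hld] at this
            exact absurd this (by simp)
          exact ⟨fun hd => absurd hd hND, fun _ => hA.trans hB.symm⟩
        | true =>
          have hld' := hld
          rw [List.all_cons, Bool.and_eq_true] at hld'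
          have hc : pvIsIntChar c = true := hld'.1
          have ht : t.all pvIsIntChar = true := hld'.2
          have h1 : pvLoop1 input.toList 0 = .inr 1 := by
            rw [hdec]
            simp only [List.cons_append, pvLoop1, hc, Bool.true_and, decide_true,
              Nat.zero_lt_one, if_true]
            rw [pvLoop1_skip t (',' :: r) ht]
            rfl
          have h2 : pvLoop2 input.toList 1 = pvLoop2 r 2 := by
            rw [hdec, pvLoop2_skip (c :: t) (',' :: r) 1 hld]
            rfl
          cases hrd : r.all pvIsIntChar with
          | false =>
            have h2b : pvLoop2 input.toList 1 = .inl false := by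
              rw [h2, pvLoop2_two, if_neg (by simp [hrd])]
            have hA : proper_coords input = false := by
              simp [proper_coords, hbeq, h1, h2b]
            have hB : proper_coords_alt input = false := by
              unfold proper_coords_alt
              rw [hsp0]
              cases hs : pvSplitC r with
              | nil => exact absurd hs (pvSplitC_ne_nil r)
              | cons y ys =>
                cases ys with
                | nil =>
                  obtain ⟨hry, _⟩ := pvSplitC_singleton r y hs
                  have hy : y.all pvIsIntChar = false := hry ▸ hrd
                  simp [hy]
                | cons z zs => rfl
            have hND : ¬ D_proper_coords input := fun hd => by
              have := (hDiff.mp hd).2.2.2.1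
              rw [all_digit_eq, hrd] at this
              exact absurd this (by simp)
            exact ⟨fun hd => absurd hd hND, fun _ => hA.trans hB.symm⟩
          | true =>
            have hnr : ',' ∉ r := fun hm => by
              have := List.all_eq_true.mp hrd _ hm
              simp [pvIsIntChar] at this
            have hspr : pvSplitC r = [r] := pvSplitC_no_comma r hnr
            have h2b : pvLoop2 input.toList 1 = .inr 2 := by
              rw [h2, pvLoop2_two, if_pos hrd]
            by_cases hre : r = []
            · subst hre
              have hA : proper_coords input = false := by
                simp [proper_coords, hbeq, h1, h2b, hsp0, hspr, pvIsIntStr]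
              have hB : proper_coords_alt input = false := by
                unfold proper_coords_alt
                rw [hsp0, hspr]
                simp
              have hND : ¬ D_proper_coords input := fun hd => (hDiff.mp hd).2.1 rfl
              exact ⟨fun hd => absurd hd hND, fun _ => hA.trans hB.symm⟩
            · have hie : r.isEmpty = false := by simp [hre]
              have hAval : proper_coords input =
                  decide (pvDigitsVal r < 2 ^ 1024 - 2 ^ 970) := by
                simp only [proper_coords, hbeq, Bool.false_eq_true, if_false, h1, h2b,
                  hsp0, hspr, pvIsIntStr, pvDigitsVal]
                by_cases hv :
                    List.foldl (fun a c => 10 * a + (c.toNat - 48)) 0 r < 2 ^ 1024 - 2 ^ 970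
                · simp [hv, hrd, hie]
                · simp [hv, hrd, hie]
              have hB : proper_coords_alt input = true := by
                unfold proper_coords_alt
                rw [hsp0, hspr]
                simp [hie, hld, hrd]
              have hiff : D_proper_coords input ↔
                  2 ^ 1024 - 2 ^ 970 ≤ pvDigitsVal r := by
                rw [hDiff]
                have h3' : ∀ x ∈ c :: t, x.isDigit = true :=
                  fun x hx => List.all_eq_true.mp hld x hx
                have h4' : ∀ x ∈ r, x.isDigit = true :=
                  fun x hx => List.all_eq_true.mp hrd x hx
                constructor
                · rintro ⟨-, -, -, -, h5⟩
                  simpa [pvDigitsVal] using h5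
                · intro h5
                  exact ⟨by simp, hre, List.all_eq_true.mpr h3', List.all_eq_true.mpr h4',
                    by simpa [pvDigitsVal] using h5⟩
              constructor
              · intro hd
                have hv := hiff.mp hd
                refine ⟨?_, hB⟩
                rw [hAval]
                simp [Nat.not_lt.mpr hv]
              · intro hnd
                have hv : pvDigitsVal r < 2 ^ 1024 - 2 ^ 970 := by
                  by_contra hge
                  exact hnd (hiff.mpr (by omega))
                rw [hAval, hB]
                simp [hv]
    · have hsp : PySem.Chars.splitOn input.toList [','] = [input.toList] := by
        rw [splitOn_comma]; exact pvSplitC_no_comma _ hcm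
      have hB : proper_coords_alt input = false := by
        unfold proper_coords_alt; rw [hsp]
      have hND : ¬ D_proper_coords input := fun hd => by
        simp only [D_proper_coords] at hd
        exact hcm hd.1
      have hA : proper_coords input = false := by
        cases hall : input.toList.all pvIsIntChar with
        | false =>
          have h1 : pvLoop1 input.toList 0 = .inl false := by
            have := pvLoop1_bad input.toList hcm hall 0 []
            simpa using this
          simp [proper_coords, hbeq, h1]
        | true =>
          obtain ⟨c, t, hct⟩ : ∃ c t, input.toList = c :: t := by
            cases hcs : input.toList with
            | nil =>
              exact absurd (by apply String.ext; simpa using hcs) hemp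
            | cons c t => exact ⟨c, t, rfl⟩
          have hall' := hall
          rw [hct, List.all_cons, Bool.and_eq_true] at hall'
          have hc : pvIsIntChar c = true := hall'.1
          have ht : t.all pvIsIntChar = true := hall'.2
          have h1 : pvLoop1 input.toList 0 = .inr 1 := by
            rw [hct]
            simp only [pvLoop1, hc, Bool.true_and, decide_true, Nat.zero_lt_one, if_true]
            have := pvLoop1_skip t [] ht
            simpa using this
          have h2 : pvLoop2 input.toList 1 = .inr 1 := by
            have := pvLoop2_skip input.toList [] 1 hall
            simpa using this
          simp [proper_coords, hbeq, h1, h2]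
      exact ⟨fun hd => absurd hd hND, fun _ => hA.trans hB.symm⟩

-- ===== VERDICT (by name: the statement is the Claim_ definition above) =====
theorem proper_coords_spec : Claim_unchanged_proper_coords := by
  intro input _ hnd
  exact (main_lemma input).2 hnd

set_option maxRecDepth 60000 in
theorem proper_coords_changed : Claim_changed_proper_coords := by
  unfold Claim_changed_proper_coords; decide

theorem proper_coords_tight : Claim_exact_proper_coords := by
  intro input _ hd
  obtain ⟨ha, hb⟩ := (main_lemma input).1 hd
  simp [ha, hb]
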